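-- pv_equiv track=rewrite | github.com/Zenetusken/PromptForge | backend/app/services/workspace_sync.py | _detect_test_patterns
-- ===== SOURCE A (Python) =====
-- def _detect_test_patterns(file_tree: list[str]) -> list[str]:
--     """Detect test patterns from file organization."""
--     patterns: list[str] = []
--
--     # Check for common test directory structures
--     has_tests_dir = any("/tests/" in f or f.startswith("tests/") for f in file_tree)
--     has_test_dir = any("/test/" in f or f.startswith("test/") for f in file_tree)
--     has_spec_files = any(f.endswith(".spec.ts") or f.endswith(".spec.js") for f in file_tree)
--     has_test_files = any(f.endswith(".test.ts") or f.endswith(".test.js") for f in file_tree)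
--     has_pytest_files = any(f.startswith("test_") or "/test_" in f for f in file_tree)
--
--     if has_tests_dir:
--         patterns.append("Separate tests/ directory")
--     if has_test_dir:
--         patterns.append("Separate test/ directory")
--     if has_spec_files:
--         patterns.append("*.spec.{ts,js} co-located test files")
--     if has_test_files:
--         patterns.append("*.test.{ts,js} co-located test files")
--     if has_pytest_files:
--         patterns.append("test_*.py pytest naming convention")
--
--     return patterns
-- ===== SOURCE B (Python) =====
-- def _detect_test_patterns(file_tree: list[str]) -> list[str]:
--     """Detect test patterns from file organization -- one pass over file_tree."""
--     tests_dir = test_dir = spec_files = test_files = pytest_files = False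
--     for f in file_tree:
--         tests_dir = tests_dir or "/tests/" in f or f.startswith("tests/")
--         test_dir = test_dir or "/test/" in f or f.startswith("test/")
--         spec_files = spec_files or f.endswith(".spec.ts") or f.endswith(".spec.js")
--         test_files = test_files or f.endswith(".test.ts") or f.endswith(".test.js")
--         pytest_files = pytest_files or f.startswith("test_") or "/test_" in f
--     patterns: list[str] = []
--     if tests_dir:
--         patterns.append("Separate tests/ directory")
--     if test_dir:
--         patterns.append("Separate test/ directory")
--     if spec_files:
--         patterns.append("*.spec.{ts,js} co-located test files")
--     if test_files:
--         patterns.append("*.test.{ts,js} co-located test files")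
--     if pytest_files:
--         patterns.append("test_*.py pytest naming convention")
--     return patterns
-- ===== Notes on version B (the rewrite author's own statement) =====
-- stated objective: simpler
-- what changed: Replaces five separate any() scans of file_tree with a single loop that updates five boolean flags at once, then emits the same labels in the same order.
import Mathlib
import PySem

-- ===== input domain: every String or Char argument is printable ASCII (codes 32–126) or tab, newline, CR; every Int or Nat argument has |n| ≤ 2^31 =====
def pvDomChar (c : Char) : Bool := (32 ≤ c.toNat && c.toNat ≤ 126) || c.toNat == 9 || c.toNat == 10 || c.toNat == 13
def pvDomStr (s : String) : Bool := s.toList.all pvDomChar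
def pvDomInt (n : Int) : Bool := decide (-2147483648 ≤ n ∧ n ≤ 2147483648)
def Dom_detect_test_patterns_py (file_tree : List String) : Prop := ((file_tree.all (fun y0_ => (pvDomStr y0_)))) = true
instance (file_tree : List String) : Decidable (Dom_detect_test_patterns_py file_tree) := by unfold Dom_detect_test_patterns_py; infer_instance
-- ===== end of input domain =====

-- One honest line: B replaces five separate any() scans with one combined pass over file_tree (simpler traversal, same output).
-- ===== PORT A =====
def detect_test_patterns_py (file_tree : List String) : List String :=
  let has_tests_dir := file_tree.any (fun f => PySem.Str.isIn "/tests/" f || PySem.Str.startswith f "tests/")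
  let has_test_dir := file_tree.any (fun f => PySem.Str.isIn "/test/" f || PySem.Str.startswith f "test/")
  let has_spec_files := file_tree.any (fun f => PySem.Str.endswith f ".spec.ts" || PySem.Str.endswith f ".spec.js")
  let has_test_files := file_tree.any (fun f => PySem.Str.endswith f ".test.ts" || PySem.Str.endswith f ".test.js")
  let has_pytest_files := file_tree.any (fun f => PySem.Str.startswith f "test_" || PySem.Str.isIn "/test_" f)
  let patterns : List String := []
  let patterns := if has_tests_dir then patterns ++ ["Separate tests/ directory"] else patterns
  let patterns := if has_test_dir then patterns ++ ["Separate test/ directory"] else patterns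
  let patterns := if has_spec_files then patterns ++ ["*.spec.{ts,js} co-located test files"] else patterns
  let patterns := if has_test_files then patterns ++ ["*.test.{ts,js} co-located test files"] else patterns
  let patterns := if has_pytest_files then patterns ++ ["test_*.py pytest naming convention"] else patterns
  patterns

-- ===== PORT B =====
def detect_test_patterns_py_alt (file_tree : List String) : List String :=
  let flags := file_tree.foldl
    (fun (st : Bool × Bool × Bool × Bool × Bool) f =>
      ( st.1 || PySem.Str.isIn "/tests/" f || PySem.Str.startswith f "tests/",
        st.2.1 || PySem.Str.isIn "/test/" f || PySem.Str.startswith f "test/",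
        st.2.2.1 || PySem.Str.endswith f ".spec.ts" || PySem.Str.endswith f ".spec.js",
        st.2.2.2.1 || PySem.Str.endswith f ".test.ts" || PySem.Str.endswith f ".test.js",
        st.2.2.2.2 || PySem.Str.startswith f "test_" || PySem.Str.isIn "/test_" f ))
    (false, false, false, false, false)
  (if flags.1 then ["Separate tests/ directory"] else []) ++
  (if flags.2.1 then ["Separate test/ directory"] else []) ++
  (if flags.2.2.1 then ["*.spec.{ts,js} co-located test files"] else []) ++
  (if flags.2.2.2.1 then ["*.test.{ts,js} co-located test files"] else []) ++
  (if flags.2.2.2.2 then ["test_*.py pytest naming convention"] else [])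

-- ===== PRECONDITION & SPEC =====
def Spec_detect_test_patterns_py (file_tree : List String) (out : List String) : Prop := out = detect_test_patterns_py_alt file_tree
instance (file_tree : List String) (out : List String) : Decidable (Spec_detect_test_patterns_py file_tree out) := by unfold Spec_detect_test_patterns_py; infer_instance

-- ===== CLAIM (what is proved, stated in full; the proofs are below) =====
def Claim_equal_detect_test_patterns_py : Prop := ∀ (file_tree : List String), Dom_detect_test_patterns_py file_tree → Spec_detect_test_patterns_py file_tree (detect_test_patterns_py file_tree)

-- ===== LEMMAS AND PROOFS =====
theorem foldl_flags (file_tree : List String)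
    (p1 p2 p3 p4 p5 q1 q2 q3 q4 q5 : String → Bool) (b1 b2 b3 b4 b5 : Bool) :
    file_tree.foldl
      (fun (st : Bool × Bool × Bool × Bool × Bool) f =>
        (st.1 || p1 f || q1 f, st.2.1 || p2 f || q2 f, st.2.2.1 || p3 f || q3 f,
         st.2.2.2.1 || p4 f || q4 f, st.2.2.2.2 || p5 f || q5 f))
      (b1, b2, b3, b4, b5)
    = (b1 || file_tree.any (fun f => p1 f || q1 f), b2 || file_tree.any (fun f => p2 f || q2 f),
       b3 || file_tree.any (fun f => p3 f || q3 f), b4 || file_tree.any (fun f => p4 f || q4 f),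
       b5 || file_tree.any (fun f => p5 f || q5 f)) := by
  induction file_tree generalizing b1 b2 b3 b4 b5 with
  | nil => simp
  | cons x xs ih => rw [List.foldl_cons, ih]; simp [Bool.or_assoc]

-- ===== VERDICT (by name: the statement is the Claim_ definition above) =====
theorem detect_test_patterns_py_spec : Claim_equal_detect_test_patterns_py := by
  intro file_tree _
  unfold Spec_detect_test_patterns_py detect_test_patterns_py detect_test_patterns_py_alt
  rw [foldl_flags]
  simp only [Bool.false_or]
  split_ifs <;> rfl
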